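-- pv_equiv track=rewrite | github.com/MCCMDave/kitchenhelper-ai | scripts/i18n-translate-simple.py | build_js_section
-- ===== SOURCE A (Python) =====
-- def build_js_section(translations):
--     """Build JavaScript object section"""
--     lines = []
--     current_category = None
--
--     for key in sorted(translations.keys()):
--         value = translations[key]
--
--         # Add category comment
--         category = key.split('.')[0]
--         if category != current_category:
--             if current_category is not None:
--                 lines.append('')
--             lines.append(f"// {category.capitalize()}")
--             current_category = category
--
--         # Escape quotes
--         value = value.replace("'", "\\'").replace("\n", "\\n")
--         lines.append(f"        '{key}': '{value}',")
--
--     return '\n'.join(lines)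
-- ===== SOURCE B (Python) =====
-- def build_js_section(translations):
--     """Build JavaScript object section"""
--     def esc(v):
--         return v.replace("'", "\\'").replace("\n", "\\n")
--
--     keys = sorted(translations.keys())
--     blocks = []
--     i = 0
--     while i < len(keys):
--         category = keys[i].split('.')[0]
--         lines = ["// " + category.capitalize()]
--         while i < len(keys) and keys[i].split('.')[0] == category:
--             lines.append("        '%s': '%s'," % (keys[i], esc(translations[keys[i]])))
--             i += 1
--         blocks.append('\n'.join(lines))
--     return '\n\n'.join(blocks)
-- ===== Notes on version B (the rewrite author's own statement) =====
-- stated objective: alternative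
-- what changed: Replaces A's single pass with sentinel current_category tracking and one flat lines list by an explicit two-level grouped pass: an outer loop per category run over the sorted keys, an inner loop emitting that run's entry lines, each group joined with '\n' into a block and the blocks joined with '\n\n' (which yields A's blank line between categories).
import Mathlib
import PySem

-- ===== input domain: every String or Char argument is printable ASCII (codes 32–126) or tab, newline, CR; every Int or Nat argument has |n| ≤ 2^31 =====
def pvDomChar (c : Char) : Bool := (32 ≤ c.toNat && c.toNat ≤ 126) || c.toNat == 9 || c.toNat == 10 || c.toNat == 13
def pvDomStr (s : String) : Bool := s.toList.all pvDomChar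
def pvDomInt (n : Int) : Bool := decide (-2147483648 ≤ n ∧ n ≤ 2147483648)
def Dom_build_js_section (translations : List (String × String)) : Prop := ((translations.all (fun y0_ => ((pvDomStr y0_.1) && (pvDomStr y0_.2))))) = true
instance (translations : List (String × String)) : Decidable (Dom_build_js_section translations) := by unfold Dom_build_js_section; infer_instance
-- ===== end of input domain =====

-- B replaces A's sentinel-tracking single pass by an explicit grouped two-level pass
-- (outer loop per category run of the sorted keys, inner loop per key, blocks joined
-- with a blank line); same result, no speed claim.

-- shared helpers (the same sub-expressions occur verbatim in both Pythons)
-- key.split('.')[0]  (split on '.' never returns an empty list, so [0] never raises)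
def pvCat (k : String) : String := ((PySem.Str.split? k ".").getD []).headD ""
-- str.capitalize(): first char uppercased, the rest lowercased (exact on ASCII; hand port, no PySem primitive)
def pvCapitalize (s : String) : String :=
  match s.toList with
  | [] => ""
  | c :: rest => String.ofList (PySem.Chars.upperChar c :: PySem.Chars.lower rest)
def pvHeader (category : String) : String := "// " ++ pvCapitalize category
-- the entry line: translations[key] (always present: key comes from the dict's keys), escaped, formatted
def pvLine (d : PySem.Dict String String) (key : String) : String :=
  "        '" ++ key ++ "': '" ++
    PySem.Str.replace (PySem.Str.replace ((d.get? key).getD "") "'" "\\'") "\n" "\\n" ++ "',"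

-- ===== PORT A =====
-- the body of A's for loop, lifted to a named helper (state = (lines, current_category))
def stepA (d : PySem.Dict String String) (st : List String × Option String) (key : String) :
    List String × Option String :=
  let category := pvCat key
  let st :=
    if some category ≠ st.2 then
      ((if st.2 = none then st.1 else st.1 ++ [""]) ++ [pvHeader category], some category)
    else st
  (st.1 ++ [pvLine d key], st.2)

def build_js_section (translations : List (String × String)) : String :=
  let d := PySem.Dict.ofList translations
  let st := (PySem.List.sorted d.keys (fun k => k) false).foldl (stepA d) ([], none)
  PySem.Str.join "\n" st.1

-- ===== PORT B =====
-- the outer while loop of Source B: each step consumes one category run of the sorted keys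
def altBlocks (d : PySem.Dict String String) : List String → List String
  | [] => []
  | k :: rest =>
    let category := pvCat k
    PySem.Str.join "\n" (pvHeader category :: (k :: rest.takeWhile (fun k' => pvCat k' == category)).map (pvLine d))
      :: altBlocks d (rest.dropWhile (fun k' => pvCat k' == category))
  termination_by ks => ks.length
  decreasing_by
    simp only [List.length_cons]
    exact Nat.lt_succ_of_le (List.length_dropWhile_le _ _)

def build_js_section_alt (translations : List (String × String)) : String :=
  let d := PySem.Dict.ofList translations
  PySem.Str.join "\n\n" (altBlocks d (PySem.List.sorted d.keys (fun k => k) false))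

-- ===== PRECONDITION & SPEC =====
def Spec_build_js_section (translations : List (String × String)) (out : String) : Prop := out = build_js_section_alt translations
instance (translations : List (String × String)) (out : String) : Decidable (Spec_build_js_section translations out) := by unfold Spec_build_js_section; infer_instance

-- ===== CLAIM (what is proved, stated in full; the proofs are below) =====
def Claim_equal_build_js_section : Prop := ∀ (translations : List (String × String)), Dom_build_js_section translations → Spec_build_js_section translations (build_js_section translations)

-- ===== LEMMAS AND PROOFS =====

-- the flat lines list A's fold produces, as a recursive function of the remaining keys
def auxA (d : PySem.Dict String String) : Option String → List String → List String
  | _, [] => []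
  | c, k :: ks =>
    (if some (pvCat k) ≠ c then (if c = none then [] else [""]) ++ [pvHeader (pvCat k)] else [])
      ++ pvLine d k :: auxA d (some (pvCat k)) ks

theorem auxA_ne_nil (d : PySem.Dict String String) (c : Option String) (k : String)
    (ks : List String) : auxA d c (k :: ks) ≠ [] := by
  simp only [auxA]
  split <;> simp

theorem A_fold (d : PySem.Dict String String) (ks : List String) :
    ∀ (l : List String) (c : Option String),
    (ks.foldl (stepA d) (l, c)).1 = l ++ auxA d c ks := by
  induction ks with
  | nil => intro l c; simp [auxA]
  | cons k ks ih =>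
    intro l c
    rw [List.foldl_cons]
    by_cases h : some (pvCat k) = c
    · have hs : stepA d (l, c) k = (l ++ [pvLine d k], c) := by
        simp [stepA, h]
      rw [hs, ih]
      simp [auxA, h]
    · rcases c with _ | c'
      · have hs : stepA d (l, none) k =
            (l ++ [pvHeader (pvCat k), pvLine d k], some (pvCat k)) := by
          simp [stepA, h]
        rw [hs, ih]
        simp [auxA]
      · have hs : stepA d (l, some c') k =
            (l ++ ["", pvHeader (pvCat k), pvLine d k], some (pvCat k)) := by
          simp [stepA, h]
        rw [hs, ih]
        simp [auxA, h]

theorem auxA_run (d : PySem.Dict String String) (c : String) :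
    ∀ (run ks : List String), (∀ k ∈ run, pvCat k = c) →
    auxA d (some c) (run ++ ks) = run.map (pvLine d) ++ auxA d (some c) ks := by
  intro run
  induction run with
  | nil => intro ks _; simp
  | cons k rest ih =>
    intro ks h
    have hk : pvCat k = c := h k (by simp)
    simp [auxA, hk, ih ks (fun x hx => h x (by simp [hx]))]

theorem auxA_shift (d : PySem.Dict String String) (c : String) (k : String) (ks : List String)
    (h : pvCat k ≠ c) : auxA d (some c) (k :: ks) = "" :: auxA d none (k :: ks) := by
  simp [auxA, h]

-- '\n'.join(xs ++ [''] ++ ys) = '\n'.join(xs) + '\n\n' + '\n'.join(ys) for nonempty xs, ys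
theorem strJoin_break (xs ys : List String) (hx : xs ≠ []) (hy : ys ≠ []) :
    PySem.Str.join "\n" (xs ++ "" :: ys) =
      PySem.Str.join "\n" xs ++ "\n\n" ++ PySem.Str.join "\n" ys := by
  apply String.ext
  simp only [PySem.Str.toList_join, String.toList_append, List.map_append, List.map_cons]
  rcases ys with _ | ⟨y, ys⟩
  · exact absurd rfl hy
  induction xs with
  | nil => exact absurd rfl hx
  | cons x xs ih =>
    rcases xs with _ | ⟨x', xs⟩
    · simp [PySem.Chars.join_cons_cons, PySem.Chars.join_singleton]
    · simp only [List.cons_append, List.map_cons] at ih ⊢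
      rw [PySem.Chars.join_cons_cons, PySem.Chars.join_cons_cons, ih (by simp)]
      simp

theorem strJoin2_cons (b : String) (bs : List String) (h : bs ≠ []) :
    PySem.Str.join "\n\n" (b :: bs) = b ++ "\n\n" ++ PySem.Str.join "\n\n" bs := by
  apply String.ext
  rcases bs with _ | ⟨b', bs⟩
  · exact absurd rfl h
  simp [PySem.Str.toList_join, PySem.Chars.join_cons_cons]

theorem strJoin_nil_nil : PySem.Str.join "\n" ([] : List String) = PySem.Str.join "\n\n" ([] : List String) := by
  apply String.ext
  simp [PySem.Str.toList_join, PySem.Chars.join_nil]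

theorem main_join (d : PySem.Dict String String) :
    ∀ (n : Nat) (ks : List String), ks.length ≤ n →
    PySem.Str.join "\n" (auxA d none ks) = PySem.Str.join "\n\n" (altBlocks d ks) := by
  intro n
  induction n with
  | zero =>
    intro ks h
    have hks : ks = [] := List.length_eq_zero_iff.mp (Nat.le_zero.mp h)
    subst hks
    simpa [auxA, altBlocks] using strJoin_nil_nil
  | succ n ih =>
    intro ks h
    rcases ks with _ | ⟨k, rest⟩
    · simpa [auxA, altBlocks] using strJoin_nil_nil
    · obtain ⟨run, hrun⟩ : ∃ r, r = rest.takeWhile (fun k' => pvCat k' == pvCat k) := ⟨_, rfl⟩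
      obtain ⟨rest', hrest'⟩ : ∃ r, r = rest.dropWhile (fun k' => pvCat k' == pvCat k) := ⟨_, rfl⟩
      have hsplit : run ++ rest' = rest := by
        rw [hrun, hrest']; exact List.takeWhile_append_dropWhile
      have hrunall : ∀ x ∈ run, pvCat x = pvCat k := by
        intro x hx; rw [hrun] at hx; simpa using List.mem_takeWhile_imp hx
      have hA : auxA d none (k :: rest) =
          (pvHeader (pvCat k) :: (k :: run).map (pvLine d)) ++ auxA d (some (pvCat k)) rest' := by
        conv_lhs => rw [← hsplit]
        simp only [auxA]
        rw [auxA_run d (pvCat k) run rest' hrunall]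
        simp
      have hlen : rest'.length ≤ n := by
        have h1 : rest'.length ≤ rest.length := by
          rw [← hsplit]; simp
        have h2 : rest.length ≤ n := by simpa using Nat.le_of_succ_le_succ h
        exact le_trans h1 h2
      rw [hA, altBlocks, ← hrun, ← hrest']
      rcases hre : rest' with _ | ⟨k', rest''⟩
      · simp only [auxA, altBlocks, List.append_nil]
        apply String.ext
        simp [PySem.Str.toList_join, PySem.Chars.join_singleton]
      · have hdw : rest.dropWhile (fun k' => pvCat k' == pvCat k) = k' :: rest'' :=
          hrest'.symm.trans hre
        have hk' : pvCat k' ≠ pvCat k := by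
          have hh := List.head_dropWhile_not (fun x => pvCat x == pvCat k) (l := rest)
            (by rw [hdw]; simp)
          simp only [hdw, List.head_cons] at hh
          simpa using hh
        have hshift : auxA d (some (pvCat k)) (k' :: rest'') = "" :: auxA d none (k' :: rest'') :=
          auxA_shift d (pvCat k) k' rest'' hk'
        rw [hshift, strJoin_break _ _ (by simp) (auxA_ne_nil d none k' rest'')]
        rw [strJoin2_cons _ _ (by rw [altBlocks]; simp)]
        rw [ih (k' :: rest'') (hre ▸ hlen)]

-- ===== VERDICT (by name: the statement is the Claim_ definition above) =====
theorem build_js_section_spec : Claim_equal_build_js_section := by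
  intro translations _
  show build_js_section translations = build_js_section_alt translations
  have hd := main_join (PySem.Dict.ofList translations) _
    (PySem.List.sorted (PySem.Dict.keys (PySem.Dict.ofList translations)) (fun k => k) false)
    (le_refl _)
  show PySem.Str.join "\n"
      (((PySem.List.sorted (PySem.Dict.keys (PySem.Dict.ofList translations)) (fun k => k) false).foldl
        (stepA (PySem.Dict.ofList translations)) ([], none)).1) = _
  rw [A_fold]
  simpa using hd
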